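-- pv_equiv track=rewrite | github.com/rugbyprof/5303-Adv-Database | Assignments/A07/code_files/isAType.py | isAClassDays
-- ===== SOURCE A (Python) =====
-- def isAClassDays(days):
--     """Checks to see if string is a valid class days string.
--
--     Args:
--         days (string): A string like MWF or TR depicting what days a class is on. If the string only consisting of the
--                     letters "MTWRFSU" and only one of each, then it is a Class Day identifier
--
--     Returns:
--         Bool :  True = the string is something like MWF or TR or F or MF any pattern with single
--                 instances of "MTWRFSU" these characters.
--     """
--     valid =  "MTWRFSU"
--
--     checksum = 0
--     dups = ""
--     for d in days:
--
--         # counting that all letters are valid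
--         if d in valid:
--             checksum +=1
--
--         # checking for duplicate letters
--         if not d in dups:
--             dups += d
--         else:
--             return False
--
--     return checksum == len(days)
-- ===== SOURCE B (Python) =====
-- def isAClassDays(days):
--     """Valid class-days string: only letters from MTWRFSU, each at most once.
--
--     Counting formulation: for each of the seven valid letters compute how often
--     it occurs in days; the string is valid iff those counts add up to the whole
--     length (so no foreign character exists) and no count reaches 2.
--     """
--     valid = "MTWRFSU"
--     counts = [sum(1 for d in days if d == v) for v in valid]
--     return sum(counts) == len(days) and all(c < 2 for c in counts)
-- ===== Notes on version B (the rewrite author's own statement) =====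
-- stated objective: alternative
-- what changed: B never scans the string for membership or duplicates: it iterates over the fixed 7-letter alphabet MTWRFSU building a per-letter occurrence count, then decides validity arithmetically (counts sum to len(days), so no foreign character, and every count < 2, so no repeats), replacing A's single per-character loop with checksum, growing dups string and early exit.
import Mathlib
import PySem

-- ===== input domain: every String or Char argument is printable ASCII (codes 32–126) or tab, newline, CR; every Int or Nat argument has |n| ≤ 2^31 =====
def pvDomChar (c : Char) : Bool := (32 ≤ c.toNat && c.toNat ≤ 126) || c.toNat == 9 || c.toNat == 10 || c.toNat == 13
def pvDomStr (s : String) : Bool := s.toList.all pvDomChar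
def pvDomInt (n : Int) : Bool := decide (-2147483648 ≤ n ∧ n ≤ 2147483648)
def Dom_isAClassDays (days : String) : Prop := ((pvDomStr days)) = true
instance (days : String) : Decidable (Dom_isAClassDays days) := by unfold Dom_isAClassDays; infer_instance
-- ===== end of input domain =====

-- ===== PORT A =====
-- B counts occurrences per valid letter (a loop over the fixed alphabet) instead of A's
-- per-character loop with a running checksum, a growing dups string and an early exit.
def isAClassDaysLoop (valid : List Char) (cs : List Char) (checksum : Int)
    (dups : List Char) (total : Int) : Bool :=
  match cs with
  | [] => checksum == total
  | d :: rest =>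
    let checksum := if valid.contains d then checksum + 1 else checksum
    if dups.contains d then false
    else isAClassDaysLoop valid rest checksum (dups ++ [d]) total

def isAClassDays (days : String) : Bool :=
  isAClassDaysLoop "MTWRFSU".toList days.toList 0 [] (PySem.Str.len days)

-- ===== PORT B =====
def isAClassDays_alt (days : String) : Bool :=
  let counts := "MTWRFSU".toList.map
    (fun v => days.toList.foldl (fun acc d => if d == v then acc + 1 else acc) (0 : Int))
  (counts.sum == PySem.Str.len days) && counts.all (fun c => c < 2)

-- ===== PRECONDITION & SPEC =====
def Spec_isAClassDays (days : String) (out : Bool) : Prop := out = isAClassDays_alt days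
instance (days : String) (out : Bool) : Decidable (Spec_isAClassDays days out) := by unfold Spec_isAClassDays; infer_instance

-- ===== CLAIM =====
def Claim_equal_isAClassDays : Prop := ∀ (days : String), Dom_isAClassDays days → Spec_isAClassDays days (isAClassDays days)

-- ===== LEMMAS AND PROOFS =====

theorem int_beq_eq_decide (a b : Int) : (a == b) = decide (a = b) := by
  by_cases h : a = b
  · simp [h]
  · simp [h, beq_eq_false_iff_ne.mpr h]

-- A's loop, characterised: true iff seen-plus-remaining letters are duplicate-free and the
-- checksum of valid letters reaches the target length.
theorem isAClassDaysLoop_eq (valid : List Char) (cs : List Char) (chk : Int)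
    (dups : List Char) (total : Int) (hnd : dups.Nodup) :
    isAClassDaysLoop valid cs chk dups total =
      (decide (dups ++ cs).Nodup && decide (chk + (cs.countP (valid.contains ·) : Int) = total)) := by
  induction cs generalizing chk dups with
  | nil =>
    simp only [isAClassDaysLoop, List.append_nil, List.countP_nil, Nat.cast_zero, add_zero, hnd,
      decide_true, Bool.true_and]
    exact int_beq_eq_decide chk total
  | cons d rest ih =>
    by_cases hmem : d ∈ dups
    · have hnod : ¬ (dups ++ d :: rest).Nodup := fun h =>
        (List.disjoint_of_nodup_append h) hmem (by simp)
      simp [isAClassDaysLoop, hmem, hnod]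
    · have hstep : isAClassDaysLoop valid (d :: rest) chk dups total =
          isAClassDaysLoop valid rest (if valid.contains d then chk + 1 else chk)
            (dups ++ [d]) total := by
        simp [isAClassDaysLoop, hmem]
      rw [hstep, ih _ _ (List.Nodup.append hnd (List.nodup_singleton d)
        (fun a ha hb => by simp at hb; subst hb; exact hmem ha))]
      rw [show dups ++ [d] ++ rest = dups ++ d :: rest by simp]
      congr 1
      rw [List.countP_cons, decide_eq_decide]
      by_cases hv : d ∈ valid <;> simp [hv] <;> omega

-- countP over a fresh head of the alphabet splits off that letter's count.
theorem countP_cons_contains (v : Char) (rest xs : List Char) (h : v ∉ rest) :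
    xs.countP (fun c => (v :: rest).contains c) =
      xs.count v + xs.countP (fun c => rest.contains c) := by
  induction xs with
  | nil => simp
  | cons x t ih =>
    simp only [List.countP_cons, List.count_cons, ih]
    by_cases hx : x = v
    · subst hx; simp [h]; omega
    · by_cases hr : x ∈ rest <;> simp [hx, hr] <;> omega

-- summing per-letter counts over a duplicate-free alphabet = counting alphabet members.
theorem sum_map_count (valid xs : List Char) (hnd : valid.Nodup) :
    (valid.map (fun v => (xs.count v : Int))).sum = (xs.countP (valid.contains ·) : Int) := by
  induction valid with
  | nil => simp
  | cons v rest ih =>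
    rcases List.nodup_cons.mp hnd with ⟨hv, hrest⟩
    simp only [List.map_cons, List.sum_cons, ih hrest, countP_cons_contains v rest xs hv]
    push_cast
    ring

-- A full count of valid letters means every letter is valid.
theorem countP_eq_length_iff (valid l : List Char) :
    l.countP (valid.contains ·) = l.length ↔ l.all (fun c => valid.contains c) = true := by
  rw [List.countP_eq_length, List.all_eq_true]

-- ===== VERDICT =====
theorem isAClassDays_spec : Claim_equal_isAClassDays := by
  intro days _
  unfold Spec_isAClassDays isAClassDays isAClassDays_alt
  set xs := days.toList with hxs
  set V : List Char := "MTWRFSU".toList with hV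
  have hVnd : V.Nodup := by rw [hV]; decide
  rw [isAClassDaysLoop_eq _ _ _ _ _ List.nodup_nil, List.nil_append]
  have hlenS : PySem.Str.len days = (xs.length : Int) := by simp [pysem, hxs]
  have hcnt : ∀ v : Char,
      xs.foldl (fun acc d => if d == v then acc + 1 else acc) (0 : Int) = (xs.count v : Int) := by
    intro v
    rw [PySem.List.foldl_beq_add_one]
    ring
  simp only [hcnt, hlenS]
  rw [sum_map_count V xs hVnd, int_beq_eq_decide, zero_add]
  by_cases hall : xs.all (fun c => V.contains c) = true
  · have hfull : xs.countP (V.contains ·) = xs.length := (countP_eq_length_iff V xs).mpr hall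
    by_cases hnd : xs.Nodup
    · have hle : ∀ v ∈ V, xs.count v ≤ 1 := fun v _ =>
        List.nodup_iff_count_le_one.mp hnd v
      simp [hnd]
      exact fun _ => hle
    · obtain ⟨v, hv2⟩ : ∃ v, 2 ≤ xs.count v := by
        by_contra hc
        push Not at hc
        exact hnd (List.nodup_iff_count_le_one.mpr (fun a => by have := hc a; omega))
      have hvV : v ∈ V := by
        have hvx : v ∈ xs := List.count_pos_iff.mp (by omega)
        simpa using (List.all_eq_true.mp hall) v hvx
      simp [hnd]
      exact fun _ => ⟨v, hvV, by omega⟩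
  · have hP : ¬ ∀ a ∈ xs, a ∈ V := by simpa [List.all_eq_true] using hall
    simp [hP]
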